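-- pv_equiv track=rewrite | github.com/cz-fish/advent-of-code | 2017/09.py | sum_groups
-- ===== SOURCE A (Python) =====
-- def skip_garbage(soup, pos):
--     escape = False
--     removed = 0
--     while True:
--         assert pos < len(soup)
--         c = soup[pos]
--         pos += 1
--         if escape:
--             escape = False
--             continue
--         if c == '!':
--             escape = True
--         elif c == '>':
--             break
--         else:
--             removed += 1
--     return pos, removed
--
-- def sum_groups(soup, pos, current) -> tuple[int, int, int]:
--     total = current
--     garbage = 0
--     while True:
--         assert pos < len(soup), str(pos)
--         c = soup[pos]
--         pos += 1
--         if c == '{':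
--             v, pos, g = sum_groups(soup, pos, current + 1)
--             total += v
--             garbage += g
--         elif c == '}':
--             break
--         elif c == '<':
--             pos, g = skip_garbage(soup, pos)
--             garbage += g
--     return total, pos, garbage
-- ===== SOURCE B (Python) =====
-- def sum_groups(soup, pos, current) -> tuple[int, int, int]:
--     # Two staged passes: one merged state-machine scan that strips garbage inline
--     # (no skip_garbage helper) and collects the brace tokens of this group into a
--     # list, then a separate scoring fold over that token list.
--     braces = []
--     garbage = 0
--     depth = 0
--     in_garbage = False
--     escape = False
--     while True:
--         assert pos < len(soup)
--         c = soup[pos]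
--         pos += 1
--         if in_garbage:
--             if escape:
--                 escape = False
--             elif c == '!':
--                 escape = True
--             elif c == '>':
--                 in_garbage = False
--             else:
--                 garbage += 1
--         elif c == '{':
--             braces.append('{')
--             depth += 1
--         elif c == '}':
--             braces.append('}')
--             if depth == 0:
--                 break
--             depth -= 1
--         elif c == '<':
--             in_garbage = True
--     total = current
--     d = current
--     for b in braces:
--         if b == '{':
--             d += 1
--             total += d
--         else:
--             d -= 1
--     return total, pos, garbage
-- ===== Notes on version B (the rewrite author's own statement) =====
-- stated objective: alternative
-- what changed: A's recursive descent with a separate skip_garbage helper is replaced by two staged passes: one merged state-machine scan (garbage/escape flags inline, no helper) that collects the group's brace tokens into a list, then a separate scoring fold over that token list with a depth counter.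
import Mathlib
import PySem

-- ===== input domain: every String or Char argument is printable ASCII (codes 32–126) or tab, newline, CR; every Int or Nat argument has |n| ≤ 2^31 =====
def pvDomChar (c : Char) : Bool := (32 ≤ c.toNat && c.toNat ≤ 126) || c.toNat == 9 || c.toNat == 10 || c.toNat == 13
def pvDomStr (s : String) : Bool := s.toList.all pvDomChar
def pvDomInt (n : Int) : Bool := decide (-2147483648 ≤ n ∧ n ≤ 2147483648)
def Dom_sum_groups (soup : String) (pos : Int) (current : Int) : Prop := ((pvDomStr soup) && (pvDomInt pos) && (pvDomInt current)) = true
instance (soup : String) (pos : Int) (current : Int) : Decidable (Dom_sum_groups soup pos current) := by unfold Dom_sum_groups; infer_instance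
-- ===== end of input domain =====

-- B replaces A's recursive descent (with its skip_garbage helper) by two staged passes:
-- a merged state-machine tokenizer that strips garbage inline and collects the group's
-- brace tokens, then a separate scoring fold over that token list (objective: alternative).
-- Both while-loops are ported with a Nat fuel that only makes the recursion structural
-- (fuel = length + |pos| + 1 bounds the iteration count); `none` marks exactly where the
-- Python raises (AssertionError at pos ≥ len, IndexError from soup[pos] at pos < -len).

-- ===== PORT A =====
-- skip_garbage: A's helper, step for step.
def skipGarbage (l : List Char) (fuel : Nat) (pos : Int) (escape : Bool) (removed : Int) :
    Option (Int × Int) :=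
  match fuel with
  | 0 => none
  | fuel + 1 =>
    if pos < (l.length : Int) then
      (PySem.List.pyGet? l pos).bind (fun c =>
        if escape then skipGarbage l fuel (pos + 1) false removed
        else if c = '!' then skipGarbage l fuel (pos + 1) true removed
        else if c = '>' then some (pos + 1, removed)
        else skipGarbage l fuel (pos + 1) escape (removed + 1))
    else none

-- A's sum_groups: the loop variables total/garbage are parameters of the recursion.
def sumGroupsAux (l : List Char) (fuel : Nat) (pos current total garbage : Int) :
    Option (Int × Int × Int) :=
  match fuel with
  | 0 => none
  | fuel + 1 =>
    if pos < (l.length : Int) then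
      (PySem.List.pyGet? l pos).bind (fun c =>
        if c = '{' then
          (sumGroupsAux l fuel (pos + 1) (current + 1) (current + 1) 0).bind (fun r =>
            sumGroupsAux l fuel r.2.1 current (total + r.1) (garbage + r.2.2))
        else if c = '}' then some (total, pos + 1, garbage)
        else if c = '<' then
          (skipGarbage l fuel (pos + 1) false 0).bind (fun r =>
            sumGroupsAux l fuel r.1 current total (garbage + r.2))
        else sumGroupsAux l fuel (pos + 1) current total garbage)
    else none

def sum_groups (soup : String) (pos : Int) (current : Int) : Int × Int × Int :=
  (sumGroupsAux soup.toList (soup.toList.length + pos.natAbs + 1) pos current current 0).getD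
    (0, 0, 0)

-- ===== PORT B =====
-- B's pass 1: one merged scanner (in_garbage/escape flags inline, no helper) that appends
-- each brace of the scanned group to `braces`, counts garbage, and stops past the '}' that
-- closes the group it started in.
def scanTokens (l : List Char) (fuel : Nat) (pos : Int) (braces : List Char)
    (garbage depth : Int) (inGarb escape : Bool) : Option (List Char × Int × Int) :=
  match fuel with
  | 0 => none
  | fuel + 1 =>
    if pos < (l.length : Int) then
      (PySem.List.pyGet? l pos).bind (fun c =>
        if inGarb then
          if escape then scanTokens l fuel (pos + 1) braces garbage depth true false
          else if c = '!' then scanTokens l fuel (pos + 1) braces garbage depth true true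
          else if c = '>' then scanTokens l fuel (pos + 1) braces garbage depth false false
          else scanTokens l fuel (pos + 1) braces (garbage + 1) depth true false
        else if c = '{' then
          scanTokens l fuel (pos + 1) (braces ++ ['{']) garbage (depth + 1) false false
        else if c = '}' then
          if depth = 0 then some (braces ++ ['}'], pos + 1, garbage)
          else scanTokens l fuel (pos + 1) (braces ++ ['}']) garbage (depth - 1) false false
        else if c = '<' then scanTokens l fuel (pos + 1) braces garbage depth true false
        else scanTokens l fuel (pos + 1) braces garbage depth false false)
    else none

-- B's pass 2: the body of the scoring for-loop (total, d as a pair).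
def scoreStep (st : Int × Int) (b : Char) : Int × Int :=
  if b = '{' then (st.1 + (st.2 + 1), st.2 + 1) else (st.1, st.2 - 1)

def sum_groups_alt (soup : String) (pos : Int) (current : Int) : Int × Int × Int :=
  match scanTokens soup.toList (soup.toList.length + pos.natAbs + 1) pos [] 0 0 false false with
  | some (braces, p, g) => ((braces.foldl scoreStep (current, current)).1, p, g)
  | none => (0, 0, 0)

-- ===== PRECONDITION & SPEC =====
-- State of the well-formedness automaton on which Pre_ is phrased: a counter of groups still
-- open above the starting one, a garbage/escape flag, and an absorbing accept state.
inductive PvSt : Type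
  | acc : PvSt
  | norm : Nat → PvSt
  | garb : Nat → PvSt
  | esc : Nat → PvSt
deriving DecidableEq, Repr

def pvStep : PvSt → Char → PvSt
  | .acc, _ => .acc
  | .norm d, c =>
      if c = '{' then .norm (d + 1)
      else if c = '}' then (if d = 0 then .acc else .norm (d - 1))
      else if c = '<' then .garb d
      else .norm d
  | .garb d, c => if c = '!' then .esc d else if c = '>' then .norm d else .garb d
  | .esc d, _ => .garb d

-- The characters Python reads: soup[pos], soup[pos+1], …; a negative start index reads from the
-- end of the string (Python's negative indexing) and then continues from the front; out of
-- range (pos < -len or pos ≥ len) nothing is readable.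
def pvStream (l : List Char) (pos : Int) : List Char :=
  if 0 ≤ pos then l.drop pos.toNat
  else if -(l.length : Int) ≤ pos then l.drop ((l.length : Int) + pos).toNat ++ l
  else []

-- Exactly the inputs on which Python's sum_groups returns: the stream of readable characters,
-- with garbage skipped, closes the current group (the brace/garbage automaton accepts) before
-- the string runs out; otherwise A raises AssertionError (or IndexError at pos < -len).
def Pre_sum_groups (soup : String) (pos : Int) (current : Int) : Prop :=
  (pvStream soup.toList pos).foldl pvStep (.norm 0) = .acc

instance (soup : String) (pos : Int) (current : Int) : Decidable (Pre_sum_groups soup pos current) := by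
  unfold Pre_sum_groups; infer_instance

def pvWitness_sum_groups : String × Int × Int := ("{a<b!>>}}", 0, 0)

def Spec_sum_groups (soup : String) (pos : Int) (current : Int) (out : Int × Int × Int) : Prop := out = sum_groups_alt soup pos current
instance (soup : String) (pos : Int) (current : Int) (out : Int × Int × Int) : Decidable (Spec_sum_groups soup pos current out) := by unfold Spec_sum_groups; infer_instance

-- ===== CLAIM (what is proved, stated in full; the proofs are below) =====
def Claim_equal_sum_groups : Prop := ∀ (soup : String) (pos : Int) (current : Int), Dom_sum_groups soup pos current → Pre_sum_groups soup pos current → Spec_sum_groups soup pos current (sum_groups soup pos current)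

-- ===== LEMMAS AND PROOFS =====

-- Remaining readable distance; every loop below consumes at least one unit of it per step.
def pvDist (l : List Char) (pos : Int) : Nat := ((l.length : Int) - pos).toNat

-- The scanner state used only by the proofs below: normal text / inside garbage / after '!'.
inductive PvMode : Type
  | norm | garb | esc
deriving DecidableEq, Repr

-- Positional form of the acceptance condition, convenient for the inductions below.
def pvOkScan (l : List Char) (pos : Int) (depth : Nat) (m : PvMode) : Bool :=
  if _h : pos < (l.length : Int) then
    match PySem.List.pyGet? l pos with
    | none => false
    | some c =>
      match m with
      | .norm =>
        if c = '{' then pvOkScan l (pos + 1) (depth + 1) .norm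
        else if c = '}' then (if depth = 0 then true else pvOkScan l (pos + 1) (depth - 1) .norm)
        else if c = '<' then pvOkScan l (pos + 1) depth .garb
        else pvOkScan l (pos + 1) depth .norm
      | .garb =>
        if c = '!' then pvOkScan l (pos + 1) depth .esc
        else if c = '>' then pvOkScan l (pos + 1) depth .norm
        else pvOkScan l (pos + 1) depth .garb
      | .esc => pvOkScan l (pos + 1) depth .garb
  else false
termination_by ((l.length : Int) - pos).toNat
decreasing_by all_goals omega

def pvStOf (m : PvMode) (d : Nat) : PvSt :=
  match m with
  | .norm => .norm d
  | .garb => .garb d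
  | .esc => .esc d

-- One readable character: the stream is soup[pos] followed by the stream from pos + 1.
lemma pvStream_cons (l : List Char) (pos : Int) (h1 : -(l.length : Int) ≤ pos)
    (h2 : pos < (l.length : Int)) :
    ∃ c, PySem.List.pyGet? l pos = some c ∧ pvStream l pos = c :: pvStream l (pos + 1) := by
  by_cases h0 : 0 ≤ pos
  · have hlt : pos.toNat < l.length := by omega
    refine ⟨l[pos.toNat], ?_, ?_⟩
    · rw [PySem.List.pyGet?_of_nonneg l h0]
      exact List.getElem?_eq_getElem hlt
    · rw [pvStream, if_pos h0, pvStream, if_pos (by omega : (0:Int) ≤ pos + 1)]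
      have e : (pos + 1).toNat = pos.toNat + 1 := by omega
      rw [e]
      exact List.drop_eq_getElem_cons hlt
  · obtain ⟨k, rfl⟩ : ∃ k : Nat, pos = -((k : Nat) : Int) := ⟨(-pos).toNat, by omega⟩
    have hk1 : 0 < k := by omega
    have hk2 : k ≤ l.length := by omega
    have hj : ((l.length : Int) + -(k : Int)).toNat = l.length - k := by omega
    have hlt2 : l.length - k < l.length := by omega
    refine ⟨l[l.length - k], ?_, ?_⟩
    · rw [PySem.List.pyGet?_neg_natCast l k hk1 hk2]
      exact List.getElem?_eq_getElem hlt2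
    · rw [pvStream, if_neg h0, if_pos h1, hj, List.drop_eq_getElem_cons hlt2]
      rw [pvStream]
      by_cases h0' : (0:Int) ≤ -(k : Int) + 1
      · rw [if_pos h0']
        have e1 : l.length - k + 1 = l.length := by omega
        have e2 : ((-(k : Int)) + 1).toNat = 0 := by omega
        simp [e1, e2, List.cons_append]
      · rw [if_neg h0', if_pos (by omega : -(l.length : Int) ≤ -(k : Int) + 1)]
        have e3 : ((l.length : Int) + (-(k : Int) + 1)).toNat = l.length - k + 1 := by omega
        rw [e3, List.cons_append]

-- The foldl automaton accepting is exactly the positional scanner accepting.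
lemma pv_fold_ok (l : List Char) :
    ∀ (n : Nat) (pos : Int), pvDist l pos < n →
      ∀ (d : Nat) (m : PvMode),
        (pvStream l pos).foldl pvStep (pvStOf m d) = .acc →
        pvOkScan l pos d m = true := by
  intro n
  induction n with
  | zero => intro pos h; simp [pvDist] at h
  | succ n ih =>
    intro pos hn d m hfold
    by_cases hin : -(l.length : Int) ≤ pos ∧ pos < (l.length : Int)
    · obtain ⟨c, hc, hcons⟩ := pvStream_cons l pos hin.1 hin.2
      rw [hcons, List.foldl_cons] at hfold
      rw [pvOkScan, dif_pos hin.2, hc]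
      have hd1 : pvDist l (pos + 1) < n := by
        simp only [pvDist] at hn ⊢; omega
      cases m with
      | norm =>
        simp only [pvStOf, pvStep] at hfold
        by_cases h1 : c = '{'
        · simp only [h1, if_true] at hfold ⊢
          exact ih (pos + 1) hd1 (d + 1) .norm (by simpa [pvStOf] using hfold)
        · simp only [h1, if_false] at hfold ⊢
          by_cases h2 : c = '}'
          · simp only [h2, if_true] at hfold ⊢
            by_cases hd : d = 0
            · simp [hd]
            · simp only [hd, if_false] at hfold ⊢
              exact ih (pos + 1) hd1 (d - 1) .norm (by simpa [pvStOf] using hfold)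
          · simp only [h2, if_false] at hfold ⊢
            by_cases h3 : c = '<'
            · simp only [h3, if_true] at hfold ⊢
              exact ih (pos + 1) hd1 d .garb (by simpa [pvStOf] using hfold)
            · simp only [h3, if_false] at hfold ⊢
              exact ih (pos + 1) hd1 d .norm (by simpa [pvStOf] using hfold)
      | garb =>
        simp only [pvStOf, pvStep] at hfold
        by_cases h1 : c = '!'
        · simp only [h1, if_true] at hfold ⊢
          exact ih (pos + 1) hd1 d .esc (by simpa [pvStOf] using hfold)
        · simp only [h1, if_false] at hfold ⊢
          by_cases h2 : c = '>'
          · simp only [h2, if_true] at hfold ⊢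
            exact ih (pos + 1) hd1 d .norm (by simpa [pvStOf] using hfold)
          · simp only [h2, if_false] at hfold ⊢
            exact ih (pos + 1) hd1 d .garb (by simpa [pvStOf] using hfold)
      | esc =>
        simp only [pvStOf, pvStep] at hfold
        exact ih (pos + 1) hd1 d .garb (by simpa [pvStOf] using hfold)
    · have hnil : pvStream l pos = [] := by
        rw [pvStream]
        by_cases h0 : 0 ≤ pos
        · rw [if_pos h0]
          exact List.drop_eq_nil_of_le (by omega)
        · rw [if_neg h0, if_neg (by omega)]
      rw [hnil] at hfold
      cases m <;> simp [pvStOf] at hfold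

-- skip_garbage succeeds with any sufficient fuel and lands back in normal mode whenever the
-- scanner accepts from the same position in the corresponding garbage mode.
lemma pv_skip_total (l : List Char) :
    ∀ (n : Nat) (pos : Int), pvDist l pos < n →
      ∀ (escape : Bool) (removed : Int) (d : Nat),
        pvOkScan l pos d (if escape then PvMode.esc else PvMode.garb) = true →
        ∃ p g, skipGarbage l n pos escape removed = some (p, g) ∧ pos < p ∧
          pvOkScan l p d .norm = true := by
  intro n
  induction n with
  | zero => intro pos h; simp [pvDist] at h
  | succ n ih =>
    intro pos hn escape removed d hok
    rw [pvOkScan] at hok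
    by_cases hlt : pos < (l.length : Int)
    · rw [dif_pos hlt] at hok
      rw [skipGarbage, if_pos hlt]
      have hd1 : pvDist l (pos + 1) < n := by
        simp only [pvDist] at hn ⊢; omega
      cases hc : PySem.List.pyGet? l pos with
      | none => rw [hc] at hok; simp at hok
      | some c =>
        rw [hc] at hok
        rw [Option.bind_some]
        cases escape with
        | true =>
          simp only [if_true] at hok ⊢
          obtain ⟨p, g, h1, h2, h3⟩ := ih (pos + 1) hd1 false removed d (by simpa using hok)
          exact ⟨p, g, h1, by omega, h3⟩
        | false =>
          simp only [if_false, Bool.false_eq_true] at hok ⊢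
          by_cases h1 : c = '!'
          · simp only [h1, if_true] at hok ⊢
            obtain ⟨p, g, ha, hb, hcn⟩ := ih (pos + 1) hd1 true removed d (by simpa using hok)
            exact ⟨p, g, ha, by omega, hcn⟩
          · simp only [h1, if_false] at hok ⊢
            by_cases h2 : c = '>'
            · simp only [h2, if_true] at hok ⊢
              exact ⟨pos + 1, removed, rfl, by omega, hok⟩
            · simp only [h2, if_false] at hok ⊢
              obtain ⟨p, g, ha, hb, hcn⟩ := ih (pos + 1) hd1 false (removed + 1) d (by simpa using hok)
              exact ⟨p, g, ha, by omega, hcn⟩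
    · rw [dif_neg hlt] at hok; simp at hok

-- A returns (with any sufficient fuel) whenever the scanner accepts, it moves strictly
-- forward, and if the close-counter was positive the scanner still accepts (one level down)
-- from where A stopped.
lemma pv_A_total (l : List Char) :
    ∀ (n : Nat) (pos : Int), pvDist l pos < n →
      ∀ (d : Nat), pvOkScan l pos d .norm = true →
        ∀ (cur tot gar : Int), ∃ t p g,
          sumGroupsAux l n pos cur tot gar = some (t, p, g) ∧ pos < p ∧
            (d = 0 ∨ pvOkScan l p (d - 1) .norm = true) := by
  intro n
  induction n with
  | zero => intro pos h; simp [pvDist] at h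
  | succ n ih =>
    intro pos hn d hok cur tot gar
    rw [pvOkScan] at hok
    by_cases hlt : pos < (l.length : Int)
    · rw [dif_pos hlt] at hok
      rw [sumGroupsAux, if_pos hlt]
      have hd1 : pvDist l (pos + 1) < n := by
        simp only [pvDist] at hn ⊢; omega
      cases hc : PySem.List.pyGet? l pos with
      | none => rw [hc] at hok; simp at hok
      | some c =>
        rw [hc] at hok
        rw [Option.bind_some]
        simp only at hok
        by_cases h1 : c = '{'
        · simp only [h1, if_true] at hok ⊢
          obtain ⟨v, p1, g1, hA1, hp1, hok1⟩ :=
            ih (pos + 1) hd1 (d + 1) hok (cur + 1) (cur + 1) 0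
          rw [hA1, Option.bind_some]
          have hok1' : pvOkScan l p1 d .norm = true := by
            rcases hok1 with h | h
            · omega
            · simpa using h
          have hd2 : pvDist l p1 < n := by
            simp only [pvDist] at hd1 ⊢; omega
          obtain ⟨t, p, g, hA2, hp2, hok2⟩ :=
            ih p1 hd2 d hok1' cur (tot + v) (gar + g1)
          exact ⟨t, p, g, hA2, by omega, hok2⟩
        · simp only [h1, if_false] at hok ⊢
          by_cases h2 : c = '}'
          · simp only [h2, if_true] at hok ⊢
            by_cases hd : d = 0
            · exact ⟨tot, pos + 1, gar, rfl, by omega, Or.inl hd⟩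
            · rw [if_neg hd] at hok
              exact ⟨tot, pos + 1, gar, rfl, by omega, Or.inr hok⟩
          · simp only [h2, if_false] at hok ⊢
            by_cases h3 : c = '<'
            · simp only [h3, if_true] at hok ⊢
              obtain ⟨p1, g1, hsk, hp1, hok1⟩ :=
                pv_skip_total l n (pos + 1) hd1 false 0 d (by simpa using hok)
              rw [hsk, Option.bind_some]
              have hd2 : pvDist l p1 < n := by
                simp only [pvDist] at hd1 ⊢; omega
              obtain ⟨t, p, g, hA2, hp2, hok2⟩ :=
                ih p1 hd2 d hok1 cur tot (gar + g1)
              exact ⟨t, p, g, hA2, by omega, hok2⟩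
            · simp only [h3, if_false] at hok ⊢
              obtain ⟨t, p, g, hA2, hp2, hok2⟩ :=
                ih (pos + 1) hd1 d hok cur tot gar
              exact ⟨t, p, g, hA2, by omega, hok2⟩
    · rw [dif_neg hlt] at hok; simp at hok

-- B's tokenizer is fuel-irrelevant: any two sufficient fuels give the same result
-- (the scanner advances pos by exactly one each step).
lemma pv_scan_fuel (l : List Char) :
    ∀ (m : Nat) (pos : Int), pvDist l pos < m →
      ∀ (m' : Nat), pvDist l pos < m' →
        ∀ (braces : List Char) (G D : Int) (ig e : Bool),
          scanTokens l m pos braces G D ig e = scanTokens l m' pos braces G D ig e := by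
  intro m
  induction m with
  | zero => intro pos h; simp [pvDist] at h
  | succ m ih =>
    intro pos hm m' hm' braces G D ig e
    match m', hm' with
    | m' + 1, hm' =>
      rw [scanTokens, scanTokens]
      by_cases hlt : pos < (l.length : Int)
      · rw [if_pos hlt, if_pos hlt]
        cases hc : PySem.List.pyGet? l pos with
        | none => rfl
        | some c =>
          rw [Option.bind_some, Option.bind_some]
          have hd1 : pvDist l (pos + 1) < m := by
            simp only [pvDist] at hm ⊢; omega
          have hd1' : pvDist l (pos + 1) < m' := by
            simp only [pvDist] at hm' ⊢; omega
          split_ifs <;> first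
            | rfl
            | exact ih (pos + 1) hd1 m' hd1' _ _ _ _ _
      · rw [if_neg hlt, if_neg hlt]

-- A successful run of skip_garbage is exactly a garbage-mode segment of B's tokenizer:
-- same exit position, the removed count added to B's garbage accumulator, no tokens.
lemma pv_skip_scan (l : List Char) :
    ∀ (n : Nat) (pos : Int),
      ∀ (e : Bool) (rm p' r' : Int), skipGarbage l n pos e rm = some (p', r') →
        ∀ (braces : List Char) (G D : Int) (m : Nat), pvDist l pos < m →
          scanTokens l m pos braces G D true e =
            scanTokens l (pvDist l p' + 1) p' braces (G + (r' - rm)) D false false := by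
  intro n
  induction n with
  | zero => intro pos e rm p' r' hsk; rw [skipGarbage] at hsk; simp at hsk
  | succ n ih =>
    intro pos e rm p' r' hsk braces G D m hm
    rw [skipGarbage] at hsk
    by_cases hlt : pos < (l.length : Int)
    · rw [if_pos hlt] at hsk
      cases hc : PySem.List.pyGet? l pos with
      | none => rw [hc] at hsk; simp at hsk
      | some c =>
        rw [hc, Option.bind_some] at hsk
        match m, hm with
        | m + 1, hm =>
          rw [scanTokens, if_pos hlt, hc, Option.bind_some]
          simp only [if_true]
          have hd1 : pvDist l (pos + 1) < m := by
            simp only [pvDist] at hm ⊢; omega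
          cases e with
          | true =>
            simp only [if_true] at hsk ⊢
            exact ih (pos + 1) false rm p' r' hsk braces G D m hd1
          | false =>
            simp only [Bool.false_eq_true, if_false] at hsk ⊢
            by_cases h1 : c = '!'
            · simp only [h1, if_true] at hsk ⊢
              exact ih (pos + 1) true rm p' r' hsk braces G D m hd1
            · simp only [h1, if_false] at hsk ⊢
              by_cases h2 : c = '>'
              · simp only [h2, if_true] at hsk ⊢
                obtain ⟨hp, hr⟩ : p' = pos + 1 ∧ r' = rm := by
                  have := hsk
                  simpa [Prod.ext_iff, eq_comm] using this
                rw [hp, hr]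
                have e1 : G + (rm - rm) = G := by ring
                rw [e1]
                exact pv_scan_fuel l m (pos + 1) hd1 (pvDist l (pos + 1) + 1)
                  (by omega) braces G D false false
              · simp only [h2, if_false] at hsk ⊢
                have h := ih (pos + 1) false (rm + 1) p' r' hsk braces (G + 1) D m hd1
                have e1 : G + 1 + (r' - (rm + 1)) = G + (r' - rm) := by ring
                rw [e1] at h
                exact h
    · rw [if_neg hlt] at hsk; simp at hsk

-- skip_garbage always moves strictly forward.
lemma pv_skip_le (l : List Char) :
    ∀ (n : Nat) (pos : Int) (e : Bool) (rm p' r' : Int),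
      skipGarbage l n pos e rm = some (p', r') → pos < p' := by
  intro n
  induction n with
  | zero => intro pos e rm p' r' h; rw [skipGarbage] at h; simp at h
  | succ n ih =>
    intro pos e rm p' r' h
    rw [skipGarbage] at h
    by_cases hlt : pos < (l.length : Int)
    · rw [if_pos hlt] at h
      cases hc : PySem.List.pyGet? l pos with
      | none => rw [hc] at h; simp at h
      | some c =>
        rw [hc, Option.bind_some] at h
        cases e with
        | true =>
          simp only [if_true] at h
          have := ih (pos + 1) false rm p' r' h; omega
        | false =>
          simp only [Bool.false_eq_true, if_false] at h
          by_cases h1 : c = '!'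
          · simp only [h1, if_true] at h
            have := ih (pos + 1) true rm p' r' h; omega
          · simp only [h1, if_false] at h
            by_cases h2 : c = '>'
            · simp only [h2, if_true] at h
              obtain ⟨hp, -⟩ : p' = pos + 1 ∧ r' = rm := by
                simpa [Prod.ext_iff, eq_comm] using h
              omega
            · simp only [h2, if_false] at h
              have := ih (pos + 1) false (rm + 1) p' r' h; omega
    · rw [if_neg hlt] at h; simp at h

-- Forward simulation: a successful frame of A's recursion at level `cur` is one segment of
-- B's tokenizer run: with relative depth 0 the tokenizer stops at the same position with the
-- frame's tokens and garbage appended; with positive relative depth it continues one level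
-- lower; and folding scoreStep over the frame's tokens from depth `cur` adds exactly A's
-- score increment and lowers the depth by one.
lemma pv_fwd (l : List Char) :
    ∀ (n : Nat) (pos : Int),
      ∀ (cur tot gar t p g : Int),
        sumGroupsAux l n pos cur tot gar = some (t, p, g) →
        pos < p ∧ ∃ tok : List Char,
          (∀ (braces : List Char) (G D : Int), 0 ≤ D →
             ∀ (m : Nat), pvDist l pos < m →
               scanTokens l m pos braces G D false false =
                 if D = 0 then some (braces ++ tok, p, G + (g - gar))
                 else scanTokens l (pvDist l p + 1) p (braces ++ tok) (G + (g - gar)) (D - 1)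
                   false false) ∧
          (∀ T : Int, tok.foldl scoreStep (T, cur) = (T + (t - tot), cur - 1)) := by
  intro n
  induction n with
  | zero => intro pos cur tot gar t p g hA; rw [sumGroupsAux] at hA; simp at hA
  | succ n ih =>
    intro pos cur tot gar t p g hA
    rw [sumGroupsAux] at hA
    by_cases hlt : pos < (l.length : Int)
    · rw [if_pos hlt] at hA
      cases hc : PySem.List.pyGet? l pos with
      | none => rw [hc] at hA; simp at hA
      | some c =>
        rw [hc, Option.bind_some] at hA
        by_cases h1 : c = '{'
        · simp only [h1, if_true] at hA
          cases hA1 : sumGroupsAux l n (pos + 1) (cur + 1) (cur + 1) 0 with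
          | none => rw [hA1] at hA; simp at hA
          | some r1 =>
            obtain ⟨v, p1, g1⟩ := r1
            rw [hA1, Option.bind_some] at hA
            obtain ⟨hp1, tok1, hB1, hF1⟩ := ih (pos + 1) (cur + 1) (cur + 1) 0 v p1 g1 hA1
            obtain ⟨hp2, tok2, hB2, hF2⟩ := ih p1 cur (tot + v) (gar + g1) t p g hA
            refine ⟨by omega, '{' :: (tok1 ++ tok2), ?_, ?_⟩
            · intro braces G D hD m hm
              match m, hm with
              | m + 1, hm =>
                rw [scanTokens, if_pos hlt, hc, Option.bind_some]
                simp only [h1, if_true, Bool.false_eq_true, if_false]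
                have hd1 : pvDist l (pos + 1) < m := by
                  simp only [pvDist] at hm ⊢; omega
                rw [hB1 (braces ++ ['{']) G (D + 1) (by omega) m hd1]
                rw [if_neg (by omega)]
                have e1 : D + 1 - 1 = D := by ring
                have e2 : G + (g1 - 0) = G + g1 := by ring
                rw [e1, e2]
                rw [hB2 (braces ++ ['{'] ++ tok1) (G + g1) D hD (pvDist l p1 + 1) (by omega)]
                have e3 : G + g1 + (g - (gar + g1)) = G + (g - gar) := by ring
                have e4 : braces ++ ['{'] ++ tok1 = braces ++ ('{' :: tok1) := by simp
                have e5 : braces ++ ('{' :: tok1) ++ tok2 = braces ++ ('{' :: (tok1 ++ tok2)) := by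
                  simp
                rw [e3, e4, e5]
            · intro T
              rw [List.foldl_cons]
              have es : scoreStep (T, cur) '{' = (T + (cur + 1), cur + 1) := by
                simp [scoreStep]
              rw [es, List.foldl_append, hF1 (T + (cur + 1))]
              have e6 : T + (cur + 1) + (v - (cur + 1)) = T + v := by ring
              have e7 : cur + 1 - 1 = cur := by ring
              rw [e6, e7, hF2 (T + v)]
              have e8 : T + v + (t - (tot + v)) = T + (t - tot) := by ring
              rw [e8]
        · simp only [h1, if_false] at hA
          by_cases h2 : c = '}'
          · simp only [h2, if_true] at hA
            obtain ⟨ht, hp', hg⟩ : t = tot ∧ p = pos + 1 ∧ g = gar := by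
              have := hA.symm
              simpa [Prod.ext_iff] using this
            refine ⟨by omega, ['}'], ?_, ?_⟩
            · intro braces G D hD m hm
              match m, hm with
              | m + 1, hm =>
                rw [scanTokens, if_pos hlt, hc, Option.bind_some]
                simp only [h2, if_true, Bool.false_eq_true, if_false,
                  if_neg (show ¬('}' = '{') by decide)]
                rw [hp', hg]
                have e1 : G + (gar - gar) = G := by ring
                rw [e1]
                by_cases hD0 : D = 0
                · rw [if_pos hD0, if_pos hD0]
                · rw [if_neg hD0, if_neg hD0]
                  have hd1 : pvDist l (pos + 1) < m := by
                    simp only [pvDist] at hm ⊢; omega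
                  exact pv_scan_fuel l m (pos + 1) hd1 (pvDist l (pos + 1) + 1) (by omega)
                    (braces ++ ['}']) G (D - 1) false false
            · intro T
              rw [ht]
              have e2 : T + (tot - tot) = T := by ring
              rw [e2]
              simp [scoreStep]
          · simp only [h2, if_false] at hA
            by_cases h3 : c = '<'
            · simp only [h3, if_true] at hA
              cases hsk : skipGarbage l n (pos + 1) false 0 with
              | none => rw [hsk] at hA; simp at hA
              | some r1 =>
                obtain ⟨p1, g1⟩ := r1
                rw [hsk, Option.bind_some] at hA
                obtain ⟨hp2, tok2, hB2, hF2⟩ := ih p1 cur tot (gar + g1) t p g hA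
                refine ⟨?_, tok2, ?_, hF2⟩
                · have h4 : pos + 1 < p1 := pv_skip_le l n (pos + 1) false 0 p1 g1 hsk
                  omega
                · intro braces G D hD m hm
                  match m, hm with
                  | m + 1, hm =>
                    rw [scanTokens, if_pos hlt, hc, Option.bind_some]
                    simp only [h3, if_true, Bool.false_eq_true, if_false,
                      if_neg (show ¬('<' = '{') by decide), if_neg (show ¬('<' = '}') by decide)]
                    have hd1 : pvDist l (pos + 1) < m := by
                      simp only [pvDist] at hm ⊢; omega
                    rw [pv_skip_scan l n (pos + 1) false 0 p1 g1 hsk braces G D m hd1]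
                    have e1 : G + (g1 - 0) = G + g1 := by ring
                    rw [e1, hB2 braces (G + g1) D hD (pvDist l p1 + 1) (by omega)]
                    have e2 : G + g1 + (g - (gar + g1)) = G + (g - gar) := by ring
                    rw [e2]
            · simp only [h3, if_false] at hA
              obtain ⟨hp2, tok2, hB2, hF2⟩ := ih (pos + 1) cur tot gar t p g hA
              refine ⟨by omega, tok2, ?_, hF2⟩
              intro braces G D hD m hm
              match m, hm with
              | m + 1, hm =>
                rw [scanTokens, if_pos hlt, hc, Option.bind_some]
                simp only [h1, if_false, h2, h3, Bool.false_eq_true]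
                have hd1 : pvDist l (pos + 1) < m := by
                  simp only [pvDist] at hm ⊢; omega
                exact hB2 braces G D hD m hd1
    · rw [if_neg hlt] at hA; simp at hA

-- ===== VERDICT (by name: the statement is the Claim_ definition above) =====
theorem sum_groups_spec : Claim_equal_sum_groups := by
  intro soup pos current _ hpre
  unfold Spec_sum_groups sum_groups sum_groups_alt
  have hfuel : pvDist soup.toList pos < soup.toList.length + pos.natAbs + 1 := by
    simp only [pvDist]; omega
  have hok : pvOkScan soup.toList pos 0 .norm = true :=
    pv_fold_ok soup.toList (soup.toList.length + pos.natAbs + 1) pos hfuel 0 .norm hpre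
  obtain ⟨t, p, g, hA, hp, _⟩ :=
    pv_A_total soup.toList (soup.toList.length + pos.natAbs + 1) pos hfuel 0 hok current current 0
  obtain ⟨_, tok, hB, hF⟩ :=
    pv_fwd soup.toList (soup.toList.length + pos.natAbs + 1) pos current current 0 t p g hA
  have hBeq := hB [] 0 0 le_rfl (soup.toList.length + pos.natAbs + 1) hfuel
  rw [if_pos rfl] at hBeq
  rw [hA, hBeq]
  have hFc := hF current
  simp only [List.nil_append]
  rw [hFc]
  norm_num
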